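-- pv_equiv track=rewrite | github.com/zhengkuozhang/mbti-chaos-debate | backend/agents/isfj_archivist.py | _scan_markers
-- ===== SOURCE A (Python) =====
-- def _scan_markers(text: str, markers: tuple[str, ...]) -> list[str]:
--     if not text:
--         return []
--     seen: set[str] = set()
--     out: list[str] = []
--     for m in markers:
--         if m in text and m not in seen:
--             seen.add(m)
--             out.append(m)
--     return out
-- ===== SOURCE B (Python) =====
-- def _scan_markers(text: str, markers: tuple[str, ...]) -> list[str]:
--     if not text:
--         return []
--     # one pass over the text per distinct marker length: collect every substring
--     # of those lengths into a set, then filter the markers in order against it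
--     subs = set()
--     for L in {len(m) for m in markers}:
--         for i in range(len(text) - L + 1):
--             subs.add(text[i:i + L])
--     out = []
--     for m in markers:
--         if m in subs and m not in out:
--             out.append(m)
--     return out
-- ===== Notes on version B (the rewrite author's own statement) =====
-- stated objective: alternative
-- what changed: Instead of running a substring search over the text for every marker, B builds one set of all text substrings of each distinct marker length (one text scan per distinct length) and then filters the markers in order by set membership.
import Mathlib
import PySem

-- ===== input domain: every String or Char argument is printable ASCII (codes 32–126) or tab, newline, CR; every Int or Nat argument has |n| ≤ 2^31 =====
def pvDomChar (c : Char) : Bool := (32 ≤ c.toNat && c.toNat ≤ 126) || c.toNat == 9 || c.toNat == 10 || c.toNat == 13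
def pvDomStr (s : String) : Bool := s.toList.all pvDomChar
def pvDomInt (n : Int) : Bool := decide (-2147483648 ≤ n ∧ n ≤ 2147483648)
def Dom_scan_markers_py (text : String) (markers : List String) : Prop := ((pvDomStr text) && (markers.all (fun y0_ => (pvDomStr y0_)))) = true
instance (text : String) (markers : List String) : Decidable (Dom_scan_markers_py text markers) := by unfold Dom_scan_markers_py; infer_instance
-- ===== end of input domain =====

-- B replaces the per-marker substring scans by one substring-set built from the text
-- (one pass per distinct marker length), then filters the markers in order (alternative algorithm).

-- ===== PORT A =====
def scan_markers_py (text : String) (markers : List String) : List String :=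
  if text = "" then []
  else
    (markers.foldl
      (fun (st : PySem.Set String × List String) m =>
        if PySem.Str.isIn m text && !(PySem.Set.contains st.1 m) then
          (PySem.Set.add st.1 m, st.2 ++ [m])
        else st)
      (PySem.Set.empty, [])).2

-- ===== PORT B =====
def scan_markers_py_alt (text : String) (markers : List String) : List String :=
  if text = "" then []
  else
    let lengths : List Int := PySem.Set.ofList (markers.map (fun m => PySem.Str.len m))
    let subs : PySem.Set String :=
      lengths.foldl
        (fun s L =>
          (PySem.List.pyRange 0 (PySem.Str.len text - L + 1) 1).foldl
            (fun s i => PySem.Set.add s (PySem.Str.slice text (some i) (some (i + L)))) s)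
        PySem.Set.empty
    markers.foldl
      (fun out m =>
        if PySem.Set.contains subs m && !(out.contains m) then out ++ [m] else out)
      []

-- ===== PRECONDITION & SPEC =====
def Spec_scan_markers_py (text : String) (markers : List String) (out : List String) : Prop := out = scan_markers_py_alt text markers
instance (text : String) (markers : List String) (out : List String) : Decidable (Spec_scan_markers_py text markers out) := by unfold Spec_scan_markers_py; infer_instance

-- ===== CLAIM (what is proved, stated in full; the proofs are below) =====
def Claim_equal_scan_markers_py : Prop := ∀ (text : String) (markers : List String), Dom_scan_markers_py text markers → Spec_scan_markers_py text markers (scan_markers_py text markers)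

-- ===== LEMMAS AND PROOFS =====

-- membership in a fold that adds g i for each i of a list
theorem pv_mem_foldl_add {α β : Type} [BEq α] [LawfulBEq α] (g : β → α)
    (ys : List β) (s : PySem.Set α) (x : α) :
    (x ∈ ys.foldl (fun s i => PySem.Set.add s (g i)) s) ↔ x ∈ s ∨ ∃ i ∈ ys, x = g i := by
  induction ys generalizing s with
  | nil => simp
  | cons y ys ih =>
    simp only [List.foldl_cons, ih, PySem.Set.mem_add, List.mem_cons]
    aesop

-- membership in the nested substring-set fold of port B
theorem pv_mem_subs_fold (text : String) (ls : List Int) (s : PySem.Set String) (x : String) :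
    (x ∈ ls.foldl
      (fun s L =>
        (PySem.List.pyRange 0 (PySem.Str.len text - L + 1) 1).foldl
          (fun s i => PySem.Set.add s (PySem.Str.slice text (some i) (some (i + L)))) s) s)
    ↔ x ∈ s ∨ ∃ L ∈ ls, ∃ i ∈ PySem.List.pyRange 0 (PySem.Str.len text - L + 1) 1,
        x = PySem.Str.slice text (some i) (some (i + L)) := by
  induction ls generalizing s with
  | nil => simp
  | cons L ls ih =>
    simp only [List.foldl_cons, ih, pv_mem_foldl_add, List.mem_cons]
    aesop

-- a slice at a range index is a substring of the text
theorem pv_subs_sound (text : String) (L i : Int)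
    (hi : i ∈ PySem.List.pyRange 0 (PySem.Str.len text - L + 1) 1) (hL : 0 ≤ L) :
    PySem.Str.isIn (PySem.Str.slice text (some i) (some (i + L))) text = true := by
  rw [PySem.Str.isIn_iff_infix, PySem.Str.toList_slice]
  obtain ⟨h0, _, _⟩ := (PySem.List.mem_pyRange_iff_of_pos (by norm_num) i).mp hi
  obtain ⟨j, rfl⟩ := Int.eq_ofNat_of_zero_le h0
  obtain ⟨k, rfl⟩ := Int.eq_ofNat_of_zero_le hL
  rw [PySem.Chars.slice_eq_listSlice, PySem.List.slice_natCast_add]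
  exact ((List.take_prefix _ _).isInfix.trans (List.drop_suffix _ _).isInfix)

-- a marker that occurs in the text is produced by the fold at its own length
theorem pv_subs_complete (text : String) (m : String)
    (h : PySem.Str.isIn m text = true) :
    ∃ i ∈ PySem.List.pyRange 0 (PySem.Str.len text - PySem.Str.len m + 1) 1,
      m = PySem.Str.slice text (some i) (some (i + PySem.Str.len m)) := by
  rw [PySem.Str.isIn_iff_infix] at h
  obtain ⟨pre, suf, hps⟩ := h
  have hlen : pre.length + m.toList.length ≤ text.toList.length := by
    have := congrArg List.length hps
    simp only [List.length_append] at this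
    omega
  refine ⟨(pre.length : Int), ?_, ?_⟩
  · rw [PySem.List.mem_pyRange_iff_of_pos (by norm_num)]
    refine ⟨by positivity, ?_, ⟨pre.length, by ring⟩⟩
    simp only [PySem.Str.len_eq]
    omega
  · apply String.toList_inj.mp
    rw [PySem.Str.toList_slice, PySem.Str.len_eq, PySem.Chars.slice_eq_listSlice,
      PySem.List.slice_natCast_add, ← hps]
    rw [List.append_assoc, List.drop_left, List.take_left]

-- for a marker, membership in B's substring set is exactly A's `m in text` test
theorem pv_contains_subs (text : String) (markers : List String) (m : String)
    (hm : m ∈ markers) :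
    PySem.Set.contains
      ((PySem.Set.ofList (markers.map (fun m => PySem.Str.len m)) : List Int).foldl
        (fun s L =>
          (PySem.List.pyRange 0 (PySem.Str.len text - L + 1) 1).foldl
            (fun s i => PySem.Set.add s (PySem.Str.slice text (some i) (some (i + L)))) s)
        PySem.Set.empty) m
    = PySem.Str.isIn m text := by
  rw [Bool.eq_iff_iff, PySem.Set.contains_iff]
  constructor
  · intro hmem
    rcases (pv_mem_subs_fold text _ _ m).mp hmem with hempty | ⟨L, hL, i, hi, rfl⟩
    · simp [PySem.Set.empty] at hempty
    · have hL0 : 0 ≤ L := by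
        obtain ⟨m', _, rfl⟩ := List.mem_map.mp ((PySem.Set.mem_ofList _ _).mp hL)
        rw [PySem.Str.len_eq]
        positivity
      exact pv_subs_sound text L i hi hL0
  · intro h
    exact (pv_mem_subs_fold text _ _ m).mpr
      (Or.inr ⟨PySem.Str.len m,
        (PySem.Set.mem_ofList _ _).mpr (List.mem_map_of_mem hm),
        pv_subs_complete text m h⟩)

-- the two output loops agree given the test equivalence and the seen/out invariant
theorem pv_loops_eq (text : String) (subs : PySem.Set String) (ms : List String)
    (seen : PySem.Set String) (out : List String)
    (htest : ∀ m ∈ ms, PySem.Set.contains subs m = PySem.Str.isIn m text)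
    (hinv : ∀ x, PySem.Set.contains seen x = out.contains x) :
    (ms.foldl
      (fun (st : PySem.Set String × List String) m =>
        if PySem.Str.isIn m text && !(PySem.Set.contains st.1 m) then
          (PySem.Set.add st.1 m, st.2 ++ [m])
        else st)
      (seen, out)).2
    = ms.foldl
        (fun out m =>
          if PySem.Set.contains subs m && !(out.contains m) then out ++ [m] else out)
        out := by
  induction ms generalizing seen out with
  | nil => rfl
  | cons m ms ih =>
    simp only [List.foldl_cons, htest m (List.mem_cons_self ..), hinv m]
    by_cases hc : (PySem.Str.isIn m text && !(out.contains m)) = true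
    · rw [if_pos hc, if_pos hc]
      refine ih _ _ (fun x hx => htest x (List.mem_cons_of_mem _ hx)) (fun x => ?_)
      have hx := hinv x
      rw [Bool.eq_iff_iff, PySem.Set.contains_iff, List.contains_iff_mem] at hx ⊢
      rw [PySem.Set.mem_add, List.mem_append]
      simp [hx]
    · rw [if_neg hc, if_neg hc]
      exact ih _ _ (fun x hx => htest x (List.mem_cons_of_mem _ hx)) hinv

-- ===== VERDICT (by name: the statement is the Claim_ definition above) =====
theorem scan_markers_py_spec : Claim_equal_scan_markers_py := by
  intro text markers _
  unfold Spec_scan_markers_py scan_markers_py scan_markers_py_alt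
  by_cases h : text = ""
  · simp [h]
  · simp only [if_neg h]
    exact pv_loops_eq text _ markers PySem.Set.empty []
      (fun m hm => pv_contains_subs text markers m hm)
      (fun x => by simp [PySem.Set.empty])
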